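-- pv_equiv track=rewrite | github.com/rezwanahmedsami/catzilla | python/catzilla/routing.py | _normalize_prefix
-- ===== SOURCE A (Python) =====
-- def _normalize_prefix(prefix: str) -> str:
--     """Normalize route prefix"""
--     if not prefix or prefix == "/":
--         return ""
--
--     # Ensure prefix starts with / but doesn't end with / (unless it's root)
--     if not prefix.startswith("/"):
--         prefix = "/" + prefix
--     if len(prefix) > 1 and prefix.endswith("/"):
--         prefix = prefix.rstrip("/")
--
--     # Normalize double slashes
--     while "//" in prefix:
--         prefix = prefix.replace("//", "/")
--
--     return prefix
-- ===== SOURCE B (Python) =====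
-- def _normalize_prefix(prefix: str) -> str:
--     """Normalize route prefix"""
--     if not prefix or prefix == "/":
--         return ""
--     parts = [p for p in prefix.split("/") if p]
--     if not parts:
--         return ""
--     return "/" + "/".join(parts)
-- ===== Notes on version B (the rewrite author's own statement) =====
-- stated objective: idiomatic
-- what changed: B tokenizes the prefix once on the slash separator, drops the empty segments and joins the remaining ones behind a single leading slash, replacing A's leading-slash insertion, trailing-slash rstrip and repeated double-slash replace loop.
import Mathlib
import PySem

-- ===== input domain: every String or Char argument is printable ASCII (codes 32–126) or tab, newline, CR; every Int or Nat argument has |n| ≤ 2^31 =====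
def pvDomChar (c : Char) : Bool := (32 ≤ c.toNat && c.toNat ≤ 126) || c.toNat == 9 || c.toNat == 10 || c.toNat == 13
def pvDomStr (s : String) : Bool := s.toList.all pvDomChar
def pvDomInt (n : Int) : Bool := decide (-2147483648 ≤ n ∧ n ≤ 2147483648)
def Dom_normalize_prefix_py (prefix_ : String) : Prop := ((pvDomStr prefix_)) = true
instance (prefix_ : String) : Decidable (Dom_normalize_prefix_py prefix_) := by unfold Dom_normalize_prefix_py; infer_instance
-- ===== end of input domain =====

-- B replaces A's prepend/rstrip/while-replace normalisation by one split-filter-join pass (idiomatic; return values proved equal on all strings).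

-- ===== PORT A =====
-- the while-replace loop of A (fuel = length; each replace pass shortens the string, so length is enough fuel)
def pvAWhile : Nat → List Char → List Char
  | 0, s => s
  | fuel + 1, s =>
    if PySem.Chars.isIn ['/', '/'] s then pvAWhile fuel (PySem.Chars.replace s ['/', '/'] ['/'])
    else s

def pvACore (p : List Char) : List Char :=
  if p = [] || p = ['/'] then []
  else
    let p1 := if PySem.Chars.startswith p ['/'] then p else '/' :: p
    -- prefix.rstrip("/") ported by hand (exact: removes the trailing run of '/' characters)
    let p2 := if decide (1 < p1.length) && PySem.Chars.endswith p1 ['/'] then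
        (p1.reverse.dropWhile (· == '/')).reverse
      else p1
    pvAWhile p2.length p2

def normalize_prefix_py (prefix_ : String) : String := String.ofList (pvACore prefix_.toList)

-- ===== PORT B =====
def pvBCore (p : List Char) : List Char :=
  if p = [] || p = ['/'] then []
  else
    let parts := (PySem.Chars.splitOn p ['/']).filter (fun w => !w.isEmpty)
    if parts.isEmpty then []
    else '/' :: PySem.Chars.join ['/'] parts

def normalize_prefix_py_alt (prefix_ : String) : String := String.ofList (pvBCore prefix_.toList)

-- ===== PRECONDITION & SPEC =====
def Spec_normalize_prefix_py (prefix_ : String) (out : String) : Prop := out = normalize_prefix_py_alt prefix_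
instance (prefix_ : String) (out : String) : Decidable (Spec_normalize_prefix_py prefix_ out) := by unfold Spec_normalize_prefix_py; infer_instance

-- ===== CLAIM (what is proved, stated in full; the proofs are below) =====
def Claim_equal_normalize_prefix_py : Prop := ∀ (prefix_ : String), Dom_normalize_prefix_py prefix_ → Spec_normalize_prefix_py prefix_ (normalize_prefix_py prefix_)

-- ===== LEMMAS AND PROOFS =====

-- One pass of Python's  s.replace("//", "/")  as a structural scan.
def pvRepl : List Char → List Char
  | [] => []
  | [c] => [c]
  | a :: b :: t => if a = '/' ∧ b = '/' then '/' :: pvRepl t else a :: pvRepl (b :: t)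

-- Collapse every run of '/' to a single '/' (the fixpoint of pvRepl).
def pvDed : List Char → List Char
  | [] => []
  | [c] => [c]
  | a :: b :: t => if a = '/' ∧ b = '/' then pvDed (b :: t) else a :: pvDed (b :: t)

-- "//" in s
def pvHas2 : List Char → Bool
  | a :: b :: t => (decide (a = '/') && decide (b = '/')) || pvHas2 (b :: t)
  | _ => false

-- s.split("/") as a structural recursion.
def pvMs : List Char → List (List Char)
  | [] => [[]]
  | c :: t => if c = '/' then [] :: pvMs t else (pvMs t).modifyHead (c :: ·)

def pvParts (l : List Char) : List (List Char) := (pvMs l).filter (fun w => !w.isEmpty)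

theorem pvMs_ne_nil (l : List Char) : pvMs l ≠ [] := by
  induction l with
  | nil => simp [pvMs]
  | cons c t IH =>
    simp only [pvMs]
    split
    · simp
    · rcases h : pvMs t with _ | ⟨a, as⟩
      · exact absurd h IH
      · simp [List.modifyHead]

theorem pvReplace_go_eq (fuel : Nat) (l acc : List Char) (h : l.length ≤ fuel) :
    PySem.Chars.replace.go ['/', '/'] ['/'] fuel l acc = acc.reverse ++ pvRepl l := by
  induction fuel generalizing l acc with
  | zero =>
    have hl : l = [] := List.eq_nil_of_length_eq_zero (by omega)
    subst hl
    rw [PySem.Chars.replace.go.eq_def]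
    simp [pvRepl]
  | succ n IH =>
    rcases l with _ | ⟨c, t⟩
    · rw [PySem.Chars.replace.go.eq_def]; simp [pvRepl]
    · rcases t with _ | ⟨d, t'⟩
      · rw [PySem.Chars.replace.go.eq_def]
        have hpre : (['/', '/'].isPrefixOf [c]) = false := by
          simp [List.isPrefixOf]
        simp only [hpre, Bool.false_eq_true, if_false]
        rw [IH [] (c :: acc) (by simp)]
        simp [pvRepl]
      · by_cases hcd : c = '/' ∧ d = '/'
        · obtain ⟨hc, hd⟩ := hcd; subst hc; subst hd
          rw [PySem.Chars.replace.go.eq_def]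
          have hpre : (['/', '/'].isPrefixOf ('/' :: '/' :: t')) = true := by
            simp [List.isPrefixOf]
          simp only [hpre, if_true]
          have e1 : List.drop (['/', '/'].length) ('/' :: '/' :: t') = t' := rfl
          have e2 : (['/'] : List Char).reverse ++ acc = '/' :: acc := rfl
          rw [e1, e2, IH t' ('/' :: acc) (by simp at h ⊢; omega)]
          simp [pvRepl]
        · rw [PySem.Chars.replace.go.eq_def]
          have hpre : (['/', '/'].isPrefixOf (c :: d :: t')) = false := by
            simp [List.isPrefixOf]
            intro h1 h2; exact hcd ⟨h1.symm, h2.symm⟩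
          simp only [hpre, Bool.false_eq_true, if_false]
          rw [IH (d :: t') (c :: acc) (by simp at h ⊢; omega)]
          simp [pvRepl, hcd]

theorem pvReplace_eq (l : List Char) : PySem.Chars.replace l ['/', '/'] ['/'] = pvRepl l := by
  rw [PySem.Chars.replace]
  simp only [List.isEmpty_cons, Bool.false_eq_true, if_false]
  rw [pvReplace_go_eq l.length l [] le_rfl]
  simp

theorem pvIsIn_eq_has2 (l : List Char) : PySem.Chars.isIn ['/', '/'] l = pvHas2 l := by
  have key : ∀ m : List Char, (['/', '/'] <:+: m) ↔ pvHas2 m = true := by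
    intro m
    induction m with
    | nil => simp [pvHas2]
    | cons a t IH =>
      rcases t with _ | ⟨b, r⟩
      · simp [pvHas2]
        intro h
        have := h.length_le
        simp at this
      · rw [List.infix_cons_iff]
        simp only [pvHas2, Bool.or_eq_true, Bool.and_eq_true, decide_eq_true_eq]
        rw [← IH]
        constructor
        · rintro (hp | hi)
          · left
            rcases List.cons_prefix_cons.mp hp with ⟨h1, hp2⟩
            rcases List.cons_prefix_cons.mp hp2 with ⟨h2, _⟩
            exact ⟨h1.symm, h2.symm⟩ 
          · right; exact hi
        · rintro (⟨h1, h2⟩ | hi)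
          · left; subst h1; subst h2
            exact ⟨r, rfl⟩
          · right; exact hi
  cases h2 : pvHas2 l with
  | true => exact (PySem.Chars.isIn_iff_infix _ _).mpr ((key l).mpr h2)
  | false =>
    rw [PySem.Chars.isIn_eq_false_iff]
    rw [key l, h2]
    simp

theorem pvDed_eq_self (l : List Char) (h : pvHas2 l = false) : pvDed l = l := by
  induction l using pvDed.induct with
  | case1 => simp [pvDed]
  | case2 c => simp [pvDed]
  | case3 a b t hab IH =>
    exfalso
    rcases hab with ⟨h1, h2⟩; subst h1; subst h2
    simp [pvHas2] at h
  | case4 a b t hab IH =>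
    simp only [pvHas2, Bool.or_eq_false_iff] at h
    simp only [pvDed, if_neg hab]
    rw [IH h.2]

theorem pvRepl_length_le (l : List Char) : (pvRepl l).length ≤ l.length := by
  induction l using pvRepl.induct with
  | case1 => simp [pvRepl]
  | case2 c => simp [pvRepl]
  | case3 a b t hab IH => simp only [pvRepl, if_pos hab]; simp at IH ⊢; omega
  | case4 a b t hab IH => simp only [pvRepl, if_neg hab]; simp at IH ⊢; omega

theorem pvRepl_cons (c : Char) (t : List Char) : ∃ u, pvRepl (c :: t) = c :: u := by
  rcases t with _ | ⟨d, t'⟩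
  · exact ⟨[], rfl⟩
  · by_cases hcd : c = '/' ∧ d = '/'
    · refine ⟨pvRepl t', ?_⟩
      rw [show pvRepl (c :: d :: t') = '/' :: pvRepl t' from by simp [pvRepl, if_pos hcd], hcd.1]
    · exact ⟨pvRepl (d :: t'), by simp [pvRepl, if_neg hcd]⟩

theorem pvRepl_length_lt (l : List Char) (h : pvHas2 l = true) : (pvRepl l).length < l.length := by
  induction l using pvRepl.induct with
  | case1 => simp [pvHas2] at h
  | case2 c => simp [pvHas2] at h
  | case3 a b t hab IH =>
    have := pvRepl_length_le t
    simp only [pvRepl, if_pos hab]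
    simp at this ⊢
    omega
  | case4 a b t hab IH =>
    have h2 : pvHas2 (b :: t) = true := by
      simp [pvHas2] at h ⊢
      rcases h with ⟨h1, h2⟩ | h
      · exact absurd ⟨h1, h2⟩ hab
      · exact h
    have := IH h2
    simp only [pvRepl, if_neg hab]
    simp at this ⊢
    omega

theorem pvDed_repl_both (n : Nat) : ∀ l : List Char, l.length ≤ n →
    pvDed (pvRepl l) = pvDed l ∧ pvDed ('/' :: pvRepl l) = pvDed ('/' :: l) := by
  induction n with
  | zero =>
    intro l hl
    have : l = [] := List.eq_nil_of_length_eq_zero (by omega)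
    subst this
    exact ⟨rfl, rfl⟩
  | succ n IH =>
    intro l hl
    rcases l with _ | ⟨a, _ | ⟨b, t⟩⟩
    · exact ⟨rfl, rfl⟩
    · exact ⟨rfl, rfl⟩
    · have hbt : (b :: t).length ≤ n := by simp at hl ⊢; omega
      have ht : t.length ≤ n := by simp at hl ⊢; omega
      by_cases hab : a = '/' ∧ b = '/'
      · rcases hab with ⟨h1, h2⟩; subst h1; subst h2
        have hrepl : pvRepl ('/' :: '/' :: t) = '/' :: pvRepl t := by
          simp [pvRepl]
        constructor
        · rw [hrepl, (IH t ht).2]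
          simp [pvDed]
        · rw [hrepl]
          have e1 : pvDed ('/' :: '/' :: pvRepl t) = pvDed ('/' :: pvRepl t) := by simp [pvDed]
          rw [e1, (IH t ht).2]
          simp [pvDed]
      · have hrepl : pvRepl (a :: b :: t) = a :: pvRepl (b :: t) := by
          simp [pvRepl, if_neg hab]
        obtain ⟨u, hu⟩ := pvRepl_cons b t
        have hM : pvDed (b :: u) = pvDed (b :: t) := by
          have := (IH (b :: t) hbt).1
          rwa [hu] at this
        constructor
        · rw [hrepl, hu]
          simp only [pvDed, if_neg hab]
          rw [hM]
        · rw [hrepl, hu]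
          by_cases ha : a = '/'
          · subst ha
            have hb : ¬b = '/' := fun hb => hab ⟨rfl, hb⟩
            have e1 : pvDed ('/' :: '/' :: b :: u) = pvDed ('/' :: b :: u) := by simp [pvDed]
            have e2 : pvDed ('/' :: '/' :: b :: t) = pvDed ('/' :: b :: t) := by simp [pvDed]
            rw [e1, e2]
            simp only [pvDed]
            rw [hM]
          · simp only [pvDed, if_neg hab]
            rw [hM]

theorem pvWhile_eq_ded (n : Nat) : ∀ s : List Char, s.length ≤ n → pvAWhile n s = pvDed s := by
  induction n with
  | zero =>
    intro s hs
    have : s = [] := List.eq_nil_of_length_eq_zero (by omega)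
    subst this
    rfl
  | succ n IH =>
    intro s hs
    simp only [pvAWhile]
    rw [pvIsIn_eq_has2]
    cases h2 : pvHas2 s with
    | false =>
      simp only [Bool.false_eq_true, if_false]
      exact (pvDed_eq_self s h2).symm
    | true =>
      simp only [if_true]
      rw [pvReplace_eq]
      have hlt := pvRepl_length_lt s h2
      rw [IH (pvRepl s) (by omega)]
      exact (pvDed_repl_both s.length s le_rfl).1

theorem pvSplitOn_go_eq (fuel : Nat) (l cur : List Char) (acc : List (List Char)) (h : l.length ≤ fuel) :
    PySem.Chars.splitOn.go ['/'] fuel l cur acc = acc.reverse ++ (pvMs l).modifyHead (cur.reverse ++ ·) := by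
  induction fuel generalizing l cur acc with
  | zero =>
    have hl : l = [] := List.eq_nil_of_length_eq_zero (by omega)
    subst hl
    rw [PySem.Chars.splitOn.go.eq_def]
    simp [pvMs]
  | succ n IH =>
    rcases l with _ | ⟨c, rest⟩
    · rw [PySem.Chars.splitOn.go.eq_def]
      simp [pvMs]
    · rw [PySem.Chars.splitOn.go.eq_def]
      by_cases hc : c = '/'
      · subst hc
        have hpre : (['/'].isPrefixOf ('/' :: rest)) = true := by simp [List.isPrefixOf]
        simp only [hpre, if_true]
        have e1 : List.drop (['/'].length) ('/' :: rest) = rest := rfl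
        rw [e1, IH rest [] _ (by simp at h ⊢; omega)]
        rcases hms : pvMs rest with _ | ⟨h0, hs0⟩
        · exact absurd hms (pvMs_ne_nil rest)
        · simp [pvMs, hms, List.modifyHead]
      · have hpre : (['/'].isPrefixOf (c :: rest)) = false := by
          simp [List.isPrefixOf]
          exact fun hx => hc hx.symm
        simp only [hpre, Bool.false_eq_true, if_false]
        rw [IH rest (c :: cur) acc (by simp at h ⊢; omega)]
        rcases hms : pvMs rest with _ | ⟨h0, hs0⟩
        · exact absurd hms (pvMs_ne_nil rest)
        · simp [pvMs, hc, hms, List.modifyHead]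

theorem pvSplitOn_eq (l : List Char) : PySem.Chars.splitOn l ['/'] = pvMs l := by
  rw [PySem.Chars.splitOn]
  rw [pvSplitOn_go_eq (l.length + 1) l [] [] (by omega)]
  rcases hms : pvMs l with _ | ⟨h0, hs0⟩
  · exact absurd hms (pvMs_ne_nil l)
  · simp [List.modifyHead]

theorem pvParts_slash_cons (t : List Char) : pvParts ('/' :: t) = pvParts t := by
  simp [pvParts, pvMs]

theorem pvParts_nil_iff (l : List Char) : pvParts l = [] ↔ ∀ c ∈ l, c = '/' := by
  induction l with
  | nil => simp [pvParts, pvMs]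
  | cons c t IH =>
    by_cases hc : c = '/'
    · subst hc
      rw [pvParts_slash_cons, IH]
      simp
    · rcases hms : pvMs t with _ | ⟨h0, hs0⟩
      · exact absurd hms (pvMs_ne_nil t)
      · simp [pvParts, pvMs, hc, hms, List.modifyHead]

theorem pvMs_append_slash (x : List Char) : pvMs (x ++ ['/']) = pvMs x ++ [[]] := by
  induction x with
  | nil => simp [pvMs]
  | cons c t IH =>
    by_cases hc : c = '/'
    · subst hc
      simp [pvMs, IH]
    · rcases hms : pvMs t with _ | ⟨h0, hs0⟩
      · exact absurd hms (pvMs_ne_nil t)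
      · simp [pvMs, hc, IH, hms, List.modifyHead]

theorem pvParts_append_slashes (z : List Char) (hz : ∀ c ∈ z, c = '/') (x : List Char) :
    pvParts (x ++ z) = pvParts x := by
  have haux : ∀ n (y : List Char), pvParts (y ++ List.replicate n '/') = pvParts y := by
    intro n
    induction n with
    | zero => simp
    | succ m IHm =>
      intro y
      rw [List.replicate_succ, List.append_cons, IHm (y ++ ['/'])]
      simp [pvParts, pvMs_append_slash, List.filter_append]
  have hz2 : z = List.replicate z.length '/' := List.eq_replicate_of_mem hz
  rw [hz2, haux]


theorem pvInter_cons (x : List Char) (F : List (List Char)) :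
    List.intercalate ['/'] (x :: F) = x ++ (if F = [] then [] else '/' :: List.intercalate ['/'] F) := by
  rcases F with _ | ⟨f, fs⟩
  · simp [List.intercalate]
  · simp [List.intercalate, List.intersperse]

theorem pvGetLast_all_slash (t : List Char) (hne : t ≠ []) (hall : ∀ c ∈ t, c = '/') :
    t.getLast? = some '/' := by
  induction t with
  | nil => exact absurd rfl hne
  | cons c t IH =>
    rcases t with _ | ⟨d, t'⟩
    · simp [hall c (by simp)]
    · rw [List.getLast?_cons_cons]
      exact IH (by simp) (fun x hx => hall x (by simp [hx]))

theorem pvHead_dropWhile (p : Char → Bool) (y : List Char) (x : Char)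
    (h : (y.dropWhile p).head? = some x) : p x = false := by
  induction y with
  | nil => simp at h
  | cons c t IH =>
    by_cases hc : p c = true
    · rw [List.dropWhile_cons_of_pos hc] at h
      exact IH h
    · rw [List.dropWhile_cons_of_neg hc] at h
      simp at h
      rw [← h]
      simpa using hc

theorem pvMs_cons_slash (y : List Char) : pvMs ('/' :: y) = [] :: pvMs y := by
  simp [pvMs]

theorem pvMs_cons_ne (x : Char) (y : List Char) (hx : ¬x = '/') :
    pvMs (x :: y) = (pvMs y).modifyHead (x :: ·) := by
  simp [pvMs, hx]

theorem pvDed_char (l : List Char) :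
    pvDed l = (if l.head? = some '/' then ['/'] else [])
      ++ List.intercalate ['/'] (pvParts l)
      ++ (if pvParts l ≠ [] ∧ l.getLast? = some '/' then ['/'] else []) := by
  induction l with
  | nil => rfl
  | cons c t IH =>
    by_cases hc : c = '/'
    · subst hc
      rcases t with _ | ⟨d, t'⟩
      · rfl
      · rw [pvParts_slash_cons, List.getLast?_cons_cons]
        by_cases hd : d = '/'
        · subst hd
          have e1 : pvDed ('/' :: '/' :: t') = pvDed ('/' :: t') := by simp [pvDed]
          rw [e1, IH]
          simp
        · have e1 : pvDed ('/' :: d :: t') = '/' :: pvDed (d :: t') := by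
            simp [pvDed, hd]
          rw [e1, IH]
          simp [hd]
    · rcases t with _ | ⟨d, t'⟩
      · simp [pvDed, pvParts, pvMs, hc, List.intercalate]
      · have hcd : ¬(c = '/' ∧ d = '/') := fun h => hc h.1
        have e1 : pvDed (c :: d :: t') = c :: pvDed (d :: t') := by simp [pvDed, hcd]
        by_cases hd : d = '/'
        · subst hd
          have hmsc : pvMs (c :: '/' :: t') = [c] :: pvMs t' := by
            rw [pvMs_cons_ne c _ hc, pvMs_cons_slash]
            simp [List.modifyHead]
          have hpl : pvParts (c :: '/' :: t') = [c] :: (pvMs t').filter (fun w => !w.isEmpty) := by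
            unfold pvParts
            rw [hmsc]
            simp
          have hpt : pvParts ('/' :: t') = (pvMs t').filter (fun w => !w.isEmpty) := by
            unfold pvParts
            rw [pvMs_cons_slash]
            simp
          rw [e1, IH, hpl, hpt, List.getLast?_cons_cons]
          rcases hF : (pvMs t').filter (fun w => !w.isEmpty) with _ | ⟨f, fs⟩
          · have hall : ∀ x ∈ ('/' :: t'), x = '/' := by
              apply (pvParts_nil_iff _).mp
              rw [hpt, hF]
            have hlastt : ('/' :: t').getLast? = some '/' :=
              pvGetLast_all_slash _ (by simp) hall
            rw [hF, hlastt]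
            simp [hc, List.intercalate]
          · rw [hF, pvInter_cons [c]]
            simp [hc]
        · obtain ⟨h1, hs1, hms'⟩ : ∃ h1 hs1, pvMs t' = h1 :: hs1 := by
            rcases hq : pvMs t' with _ | ⟨a, b⟩
            · exact absurd hq (pvMs_ne_nil t')
            · exact ⟨a, b, rfl⟩
          have hmsd : pvMs (d :: t') = (d :: h1) :: hs1 := by
            rw [pvMs_cons_ne d _ hd, hms']
            simp [List.modifyHead]
          have hmsc : pvMs (c :: d :: t') = (c :: d :: h1) :: hs1 := by
            rw [pvMs_cons_ne c _ hc, hmsd]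
            simp [List.modifyHead]
          have hpl : pvParts (c :: d :: t') = (c :: d :: h1) :: hs1.filter (fun w => !w.isEmpty) := by
            unfold pvParts
            rw [hmsc]
            simp
          have hpt : pvParts (d :: t') = (d :: h1) :: hs1.filter (fun w => !w.isEmpty) := by
            unfold pvParts
            rw [hmsd]
            simp
          rw [e1, IH, hpl, hpt, List.getLast?_cons_cons]
          rw [pvInter_cons, pvInter_cons (c :: d :: h1)]
          simp [hd, hc]

theorem pvStartswith_slash (l : List Char) : PySem.Chars.startswith l ['/'] = true ↔ l.head? = some '/' := by
  rcases l with _ | ⟨c, t⟩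
  · simp [PySem.Chars.startswith, List.isPrefixOf]
  · simp [PySem.Chars.startswith, List.isPrefixOf]
    exact eq_comm

theorem pvEndswith_slash (l : List Char) : PySem.Chars.endswith l ['/'] = true ↔ l.getLast? = some '/' := by
  have he : PySem.Chars.endswith l ['/'] = PySem.Chars.startswith l.reverse ['/'] := rfl
  rw [he, pvStartswith_slash, List.head?_reverse]


theorem pvTail_eq (p1 : List Char) (hh : p1.head? = some '/') (hP : pvParts p1 ≠ []) :
    pvAWhile (if decide (1 < p1.length) && PySem.Chars.endswith p1 ['/'] then
        (p1.reverse.dropWhile (· == '/')).reverse else p1).length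
      (if decide (1 < p1.length) && PySem.Chars.endswith p1 ['/'] then
        (p1.reverse.dropWhile (· == '/')).reverse else p1)
      = '/' :: List.intercalate ['/'] (pvParts p1) := by
  by_cases hend : p1.getLast? = some '/'
  · have hlen : 1 < p1.length := by
      rcases p1 with _ | ⟨a, _ | ⟨b, r⟩⟩
      · simp at hh
      · exfalso
        apply hP
        simp at hh
        subst hh
        rfl
      · simp
    have hcond : (decide (1 < p1.length) && PySem.Chars.endswith p1 ['/']) = true := by
      simp [hlen, (pvEndswith_slash p1).mpr hend]
    rw [if_pos hcond]
    have hdecomp : (p1.reverse.dropWhile (· == '/')).reverse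
        ++ (p1.reverse.takeWhile (· == '/')).reverse = p1 := by
      rw [← List.reverse_append, List.takeWhile_append_dropWhile, List.reverse_reverse]
    have htw : ∀ c ∈ (p1.reverse.takeWhile (· == '/')).reverse, c = '/' := by
      intro c hcmem
      have h2 : c ∈ p1.reverse.takeWhile (· == '/') := by simpa using hcmem
      have := List.mem_takeWhile_imp h2
      simpa using this
    have hparts : pvParts ((p1.reverse.dropWhile (· == '/')).reverse) = pvParts p1 := by
      conv_rhs => rw [← hdecomp]
      rw [pvParts_append_slashes _ htw]
    have hrs_ne : (p1.reverse.dropWhile (· == '/')).reverse ≠ [] := by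
      intro h
      apply hP
      rw [← hparts, h]
      rfl
    have hhead : ((p1.reverse.dropWhile (· == '/')).reverse).head? = some '/' := by
      rcases hrsl : (p1.reverse.dropWhile (· == '/')).reverse with _ | ⟨x, xs⟩
      · exact absurd hrsl hrs_ne
      · have hx : p1.head? = some x := by
          rw [← hdecomp, hrsl]
          rfl
        rw [hh] at hx
        injection hx with hx
        rw [List.head?_cons, ← hx]
    have hlast : ¬ (p1.reverse.dropWhile (· == '/')).head? = some '/' := by
      intro hcon
      have := pvHead_dropWhile _ _ _ hcon
      simp at this
    rw [pvWhile_eq_ded _ _ le_rfl, pvDed_char, hparts, hhead]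
    simp [hlast]
  · have hcond : (decide (1 < p1.length) && PySem.Chars.endswith p1 ['/']) = false := by
      have he : PySem.Chars.endswith p1 ['/'] = false := by
        cases hE : PySem.Chars.endswith p1 ['/']
        · rfl
        · exact absurd ((pvEndswith_slash p1).mp hE) hend
      simp [he]
    rw [if_neg (by simp [hcond])]
    rw [pvWhile_eq_ded _ _ le_rfl, pvDed_char, hh]
    simp [hend]

theorem pvCore_eq (l : List Char) : pvACore l = pvBCore l := by
  by_cases h0 : l = [] ∨ l = ['/']
  · rcases h0 with h | h <;> subst h <;> rfl
  · have hne : l ≠ [] := fun h => h0 (Or.inl h)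
    have hne1 : l ≠ ['/'] := fun h => h0 (Or.inr h)
    have hbool : ¬((decide (l = []) || decide (l = ['/'])) = true) := by
      simp [hne, hne1]
    simp only [pvACore, pvBCore, if_neg hbool]
    rw [pvSplitOn_eq]
    have hPB : (pvMs l).filter (fun w => !w.isEmpty) = pvParts l := rfl
    rw [hPB]
    by_cases hP : pvParts l = []
    · have hall : ∀ c ∈ l, c = '/' := (pvParts_nil_iff l).mp hP
      have hh : l.head? = some '/' := by
        rcases l with _ | ⟨c, t⟩
        · exact absurd rfl hne
        · simp [hall c (by simp)]
      have hsw : PySem.Chars.startswith l ['/'] = true := (pvStartswith_slash l).mpr hh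
      rw [if_pos hsw]
      have hlen : 1 < l.length := by
        rcases l with _ | ⟨c, _ | ⟨d, t⟩⟩
        · exact absurd rfl hne
        · exact absurd (by rw [hall c (by simp)]) hne1
        · simp
      have hend : PySem.Chars.endswith l ['/'] = true :=
        (pvEndswith_slash l).mpr (pvGetLast_all_slash l hne hall)
      rw [if_pos (by simp [hlen, hend])]
      have hdw : l.reverse.dropWhile (· == '/') = [] := by
        rw [List.dropWhile_eq_nil_iff]
        intro x hx
        simp [hall x (by simpa using hx)]
      rw [hdw]
      simp [hP, pvAWhile]
    · have hBne : ¬((pvParts l).isEmpty = true) := by simp [hP]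
      rw [if_neg hBne]
      have hj : PySem.Chars.join ['/'] (pvParts l) = List.intercalate ['/'] (pvParts l) := rfl
      rw [hj]
      cases hsw : PySem.Chars.startswith l ['/'] with
      | true =>
        have hh : l.head? = some '/' := (pvStartswith_slash l).mp hsw
        have ht : (if true = true then l else '/' :: l) = l := if_pos rfl
        rw [ht]
        exact pvTail_eq l hh hP
      | false =>
        have ht : (if false = true then l else '/' :: l) = '/' :: l := if_neg (by simp)
        rw [ht]
        have hstep := pvTail_eq ('/' :: l) (by simp) (by rw [pvParts_slash_cons]; exact hP)
        rw [hstep, pvParts_slash_cons]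

-- ===== VERDICT (by name: the statement is the Claim_ definition above) =====
theorem normalize_prefix_py_spec : Claim_equal_normalize_prefix_py := by
  intro s _
  unfold Spec_normalize_prefix_py normalize_prefix_py normalize_prefix_py_alt
  rw [pvCore_eq]
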